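-- pv_equiv track=rewrite | github.com/Lucky-Kandpal/chatqa-api | chat_qa.py | retrieve_relevant_messages
-- ===== SOURCE A (Python) =====
-- def retrieve_relevant_messages(query, chat_data, top_k=20):
--     query_words = set(query.lower().split())
--     scored_messages = []
--     for msg in chat_data:
--         msg_words = set(msg["message"].lower().split())
--         score = len(query_words.intersection(msg_words))
--         if score > 0:
--             scored_messages.append((score, msg))
--     scored_messages.sort(key=lambda x: x[0], reverse=True)
--     return [msg for _, msg in scored_messages[:top_k]]
-- ===== SOURCE B (Python) =====
-- def retrieve_relevant_messages(query, chat_data, top_k=20):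
--     query_words = set(query.lower().split())
--     buckets = {}
--     max_score = 0
--     for msg in chat_data:
--         score = len(query_words.intersection(set(msg["message"].lower().split())))
--         if score > 0:
--             buckets.setdefault(score, []).append(msg)
--             if score > max_score:
--                 max_score = score
--     result = []
--     for s in range(max_score, 0, -1):
--         result.extend(buckets.get(s, []))
--     return result[:top_k]
-- ===== Notes on version B (the rewrite author's own statement) =====
-- stated objective: alternative
-- what changed: Replaces the comparison sort of scored messages with a counting/bucket pass: scores go into buckets[score] in one loop (tracking the max score), and the result is emitted by walking scores from max down to 1, so no sort is performed.
-- outside the precondition, e.g. on retrieve_relevant_messages('hi', [{}], 3): A raises KeyError, B raises KeyError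
import Mathlib
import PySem

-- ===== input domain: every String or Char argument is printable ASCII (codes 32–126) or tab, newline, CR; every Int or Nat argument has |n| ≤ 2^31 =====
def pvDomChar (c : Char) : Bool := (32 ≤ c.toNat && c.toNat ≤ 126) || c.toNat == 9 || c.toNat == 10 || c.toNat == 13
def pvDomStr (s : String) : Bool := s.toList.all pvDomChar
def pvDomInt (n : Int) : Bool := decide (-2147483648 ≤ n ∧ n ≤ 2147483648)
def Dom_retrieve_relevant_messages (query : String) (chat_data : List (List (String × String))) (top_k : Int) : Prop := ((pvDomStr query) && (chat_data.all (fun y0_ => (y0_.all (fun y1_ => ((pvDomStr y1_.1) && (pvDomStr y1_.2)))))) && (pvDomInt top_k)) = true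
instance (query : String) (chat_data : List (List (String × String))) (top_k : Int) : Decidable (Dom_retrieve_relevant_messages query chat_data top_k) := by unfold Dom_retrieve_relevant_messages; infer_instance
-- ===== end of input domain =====

-- B replaces A's comparison sort of the scored messages by a counting/bucket pass over the
-- bounded integer scores (buckets score→messages in insertion order, emitted from the maximum
-- score down); same return value, different algorithm.

-- ===== PORT A =====
def retrieve_relevant_messages (query : String) (chat_data : List (List (String × String))) (top_k : Int) : List (List (String × String)) :=
  let query_words := PySem.Set.ofList (PySem.Str.split₀ (PySem.Str.lower query))
  let scored_messages := chat_data.foldl (fun acc msg =>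
      let msg_words := PySem.Set.ofList (PySem.Str.split₀ (PySem.Str.lower (PySem.Dict.getD (PySem.Dict.mk msg) "message" "")))
      let score := PySem.Set.len (PySem.Set.inter query_words msg_words)
      if score > 0 then acc ++ [(score, msg)] else acc) []
  let sorted_msgs := PySem.List.sorted scored_messages (fun x => x.1) true
  (PySem.List.slice sorted_msgs none (some top_k)).map (fun x => x.2)

-- ===== PORT B =====
def retrieve_relevant_messages_alt (query : String) (chat_data : List (List (String × String))) (top_k : Int) : List (List (String × String)) :=
  let query_words := PySem.Set.ofList (PySem.Str.split₀ (PySem.Str.lower query))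
  let st := chat_data.foldl (fun (st : PySem.Dict Int (List (List (String × String))) × Int) msg =>
      let score := PySem.Set.len (PySem.Set.inter query_words (PySem.Set.ofList (PySem.Str.split₀ (PySem.Str.lower (PySem.Dict.getD (PySem.Dict.mk msg) "message" "")))))
      if score > 0 then
        (PySem.Dict.modify st.1 score [] (· ++ [msg]), if score > st.2 then score else st.2)
      else st) (PySem.Dict.empty, 0)
  let result := (PySem.List.pyRange st.2 0 (-1)).foldl (fun acc s => acc ++ PySem.Dict.getD st.1 s []) []
  PySem.List.slice result none (some top_k)

-- ===== PRECONDITION & SPEC =====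
-- Pre_ excludes chat entries without a "message" key, on which the Python A raises KeyError.
def Pre_retrieve_relevant_messages (query : String) (chat_data : List (List (String × String))) (top_k : Int) : Prop :=
  ∀ msg ∈ chat_data, (PySem.Dict.get? (PySem.Dict.mk msg) "message").isSome = true
instance (query : String) (chat_data : List (List (String × String))) (top_k : Int) : Decidable (Pre_retrieve_relevant_messages query chat_data top_k) := by unfold Pre_retrieve_relevant_messages; infer_instance
def pvWitness_retrieve_relevant_messages : String × (List (List (String × String))) × Int :=
  ("hello world", [[("message", "hello there")], [("message", "bye")]], 1)

def Spec_retrieve_relevant_messages (query : String) (chat_data : List (List (String × String))) (top_k : Int) (out : List (List (String × String))) : Prop := out = retrieve_relevant_messages_alt query chat_data top_k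
instance (query : String) (chat_data : List (List (String × String))) (top_k : Int) (out : List (List (String × String))) : Decidable (Spec_retrieve_relevant_messages query chat_data top_k out) := by unfold Spec_retrieve_relevant_messages; infer_instance

-- ===== CLAIM (what is proved, stated in full; the proofs are below) =====
def Claim_equal_retrieve_relevant_messages : Prop := ∀ (query : String) (chat_data : List (List (String × String))) (top_k : Int), Dom_retrieve_relevant_messages query chat_data top_k → Pre_retrieve_relevant_messages query chat_data top_k → Spec_retrieve_relevant_messages query chat_data top_k (retrieve_relevant_messages query chat_data top_k)

-- ===== LEMMAS AND PROOFS =====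

-- A's accumulation loop builds the filtered, scored list (generic in the score function)
lemma pvFoldA_gen {M : Type} (sc : M → Int) (l : List M) (acc : List (Int × M)) :
    l.foldl (fun acc msg => if sc msg > 0 then acc ++ [(sc msg, msg)] else acc) acc
    = acc ++ ((l.filter (fun m => decide (0 < sc m))).map (fun m => (sc m, m))) := by
  induction l generalizing acc with
  | nil => simp
  | cons m t ih =>
    simp only [List.foldl_cons, List.filter_cons]
    by_cases h : 0 < sc m
    · rw [if_pos h, ih]; simp [h]
    · rw [if_neg h, ih]; simp [h]

-- B's accumulation loop: the buckets dict and the running maximum, characterised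
lemma pvFoldB_gen {M : Type} (sc : M → Int) (l : List M)
    (d : PySem.Dict Int (List M)) (mx : Int) :
    l.foldl (fun (st : PySem.Dict Int (List M) × Int) msg =>
      if sc msg > 0 then
        (PySem.Dict.modify st.1 (sc msg) [] (· ++ [msg]), if sc msg > st.2 then sc msg else st.2)
      else st) (d, mx)
    = (((l.filter (fun m => decide (0 < sc m))).map (fun m => (sc m, m))).foldl
         (fun d p => PySem.Dict.modify d p.1 [] (· ++ [p.2])) d,
       ((l.filter (fun m => decide (0 < sc m))).map (fun m => (sc m, m))).foldl
         (fun a p => max a p.1) mx) := by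
  induction l generalizing d mx with
  | nil => simp
  | cons m t ih =>
    simp only [List.foldl_cons, List.filter_cons]
    by_cases h : 0 < sc m
    · rw [if_pos h]
      simp only [h, decide_true, if_pos, List.map_cons, List.foldl_cons]
      rw [ih]
      have hmax : (if sc m > mx then sc m else mx) = max mx (sc m) := by
        rw [max_def]; split_ifs <;> omega
      rw [hmax]
    · rw [if_neg h]
      simp only [h, decide_false, Bool.false_eq_true, if_neg, not_false_eq_true]
      exact ih d mx

-- buckets from score m down to 1, each bucket in original order
def pvBuckets {M : Type} (m : Int) (l : List (Int × M)) : List (Int × M) :=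
  (PySem.List.pyRange m 0 (-1)).flatMap (fun s => l.filter (fun p => p.1 == s))

lemma pv_flatMap_congr {A B : Type} {l : List A} {f g : A → List B}
    (h : ∀ a ∈ l, f a = g a) : l.flatMap f = l.flatMap g := by
  simp only [List.flatMap_def]
  exact congrArg List.flatten (List.map_congr_left h)

lemma pv_insertBy_cons {A : Type} (before : A → A → Bool) (x y : A) (ys : List A) :
    PySem.List.insertBy before x (y :: ys) =
      if before x y then x :: y :: ys else y :: PySem.List.insertBy before x ys := rfl

lemma pv_insertBy_prefix {A : Type} (before : A → A → Bool) (x : A) (pre t : List A)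
    (h : ∀ y ∈ pre, before x y = false) :
    PySem.List.insertBy before x (pre ++ t) = pre ++ PySem.List.insertBy before x t := by
  induction pre with
  | nil => simp
  | cons y ys ih =>
    rw [List.cons_append, pv_insertBy_cons, if_neg, ih (fun z hz => h z (by simp [hz]))]
    · rfl
    · simp [h y (by simp)]

lemma pv_insertBy_head {A : Type} (before : A → A → Bool) (x : A) (ys : List A)
    (h : ∀ y ∈ ys, before x y = true) :
    PySem.List.insertBy before x ys = x :: ys := by
  cases ys with
  | nil => rfl
  | cons y t => rw [pv_insertBy_cons, if_pos (h y (by simp))]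

lemma pv_mem_pvBuckets {M : Type} {m : Int} {l : List (Int × M)} {p}
    (h : p ∈ pvBuckets m l) : 0 < p.1 ∧ p.1 ≤ m := by
  simp only [pvBuckets, List.mem_flatMap, List.mem_filter] at h
  obtain ⟨s, hs, _, hp⟩ := h
  rw [PySem.List.mem_pyRange_neg_one] at hs
  have : p.1 = s := by simpa using hp
  omega

lemma pvBuckets_cons {M : Type} (m : Int) (l : List (Int × M)) (hm : 0 < m) :
    pvBuckets m l = l.filter (fun p => p.1 == m) ++ pvBuckets (m - 1) l := by
  rw [pvBuckets, PySem.List.pyRange_neg_one_cons hm, List.flatMap_cons]; rfl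

lemma pvBuckets_append_gt {M : Type} (m : Int) (l : List (Int × M)) (x : Int × M)
    (hx : m < x.1) : pvBuckets m (l ++ [x]) = pvBuckets m l := by
  unfold pvBuckets
  refine pv_flatMap_congr (fun s hs => ?_)
  rw [PySem.List.mem_pyRange_neg_one] at hs
  rw [List.filter_append]
  have : x.1 ≠ s := by omega
  simp [this]

-- inserting x into the descending bucket concatenation appends it to its own bucket
lemma pvBuckets_insert_aux {M : Type} (n : Nat) : ∀ (m : Int) (x : Int × M) (l : List (Int × M)),
    0 < x.1 → x.1 ≤ m → (m - x.1).toNat = n →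
    PySem.List.insertBy (fun a b => decide (b.1 < a.1)) x (pvBuckets m l) = pvBuckets m (l ++ [x]) := by
  induction n with
  | zero =>
    intro m x l hx0 hxm hn
    have hm : m = x.1 := by omega
    have hm0 : 0 < m := by omega
    rw [pvBuckets_cons m l hm0,
        pv_insertBy_prefix _ _ _ _ (by
          intro y hy
          have : y.1 = m := by simpa using (List.mem_filter.mp hy).2
          simp [this, hm]),
        pv_insertBy_head _ _ _ (by
          intro y hy
          have := pv_mem_pvBuckets hy
          simp; omega),
        pvBuckets_cons m (l ++ [x]) hm0, pvBuckets_append_gt (m - 1) l x (by omega),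
        List.filter_append]
    have : x.1 == m := by simp [hm]
    simp [this]
  | succ n ih =>
    intro m x l hx0 hxm hn
    have hm0 : 0 < m := by omega
    have hlt : x.1 < m := by omega
    rw [pvBuckets_cons m l hm0,
        pv_insertBy_prefix _ _ _ _ (by
          intro y hy
          have : y.1 = m := by simpa using (List.mem_filter.mp hy).2
          simp [this]; omega),
        ih (m - 1) x l hx0 (by omega) (by omega),
        pvBuckets_cons m (l ++ [x]) hm0, List.filter_append]
    have : ¬ (x.1 == m) := by simp; omega
    simp [this]

-- Python's stable reverse sort by score IS the descending bucket concatenation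
lemma pv_sorted_eq_pvBuckets {M : Type} (l : List (Int × M)) (m : Int)
    (h : ∀ p ∈ l, 0 < p.1 ∧ p.1 ≤ m) :
    PySem.List.sorted l (fun x => x.1) true = pvBuckets m l := by
  induction l using List.reverseRecOn with
  | nil => simp [PySem.List.sorted, pvBuckets]
  | append_singleton t x ih =>
    rw [PySem.List.sorted_rev_eq_foldl_insertBy, List.foldl_append, List.foldl_cons, List.foldl_nil,
        ← PySem.List.sorted_rev_eq_foldl_insertBy, ih (fun p hp => h p (by simp [hp]))]
    exact pvBuckets_insert_aux _ m x t (h x (by simp)).1 (h x (by simp)).2 rfl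

lemma pv_map_slice_to {A B : Type} (f : A → B) (xs : List A) (b : Int) :
    (PySem.List.slice xs none (some b)).map f = PySem.List.slice (xs.map f) none (some b) := by
  simp [PySem.List.slice, List.map_take]

-- ===== VERDICT (by name: the statement is the Claim_ definition above) =====
theorem retrieve_relevant_messages_spec : Claim_equal_retrieve_relevant_messages := by
  intro query chat_data top_k _ _
  unfold Spec_retrieve_relevant_messages retrieve_relevant_messages retrieve_relevant_messages_alt
  simp only
  rw [pvFoldA_gen, pvFoldB_gen, List.nil_append]
  set sc := fun msg => PySem.Set.len (PySem.Set.inter (PySem.Set.ofList (PySem.Str.split₀ (PySem.Str.lower query))) (PySem.Set.ofList (PySem.Str.split₀ (PySem.Str.lower (PySem.Dict.getD (PySem.Dict.mk msg) "message" ""))))) with hsc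
  set scored := (chat_data.filter (fun m => decide (0 < sc m))).map (fun m => (sc m, m)) with hscored
  set mx := scored.foldl (fun a p => max a p.1) 0 with hmx
  have hbound : ∀ p ∈ scored, 0 < p.1 ∧ p.1 ≤ mx := by
    intro p hp
    refine ⟨?_, (PySem.List.le_foldl_max_int scored (fun p => p.1) 0).2 p hp⟩
    rw [hscored] at hp
    obtain ⟨m, hm, rfl⟩ := List.mem_map.mp hp
    simpa using (List.mem_filter.mp hm).2
  rw [PySem.List.foldl_append_eq_flatMap, List.nil_append]
  calc (PySem.List.slice ((PySem.List.sorted scored (fun x => x.1) true)) none (some top_k)).map (fun x => x.2)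
      = PySem.List.slice ((PySem.List.sorted scored (fun x => x.1) true).map (fun x => x.2)) none (some top_k) := pv_map_slice_to _ _ _
    _ = PySem.List.slice ((pvBuckets mx scored).map (fun x => x.2)) none (some top_k) := by
          rw [pv_sorted_eq_pvBuckets scored mx hbound]
    _ = PySem.List.slice ((PySem.List.pyRange mx 0 (-1)).flatMap (fun s => PySem.Dict.getD (scored.foldl (fun d p => PySem.Dict.modify d p.1 [] (· ++ [p.2])) PySem.Dict.empty) s [])) none (some top_k) := by
          congr 1
          rw [pvBuckets, List.map_flatMap]
          refine pv_flatMap_congr (fun s _ => ?_)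
          rw [PySem.Dict.getD_foldl_modify_append, PySem.Dict.getD_empty, List.nil_append]
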